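-- pv_equiv track=rewrite | github.com/odebrino/Code-OSS_IDE_for_LaTeX_template | src/app.py | plaintext_to_latex
-- ===== SOURCE A (Python) =====
-- def escape_latex_text(s: str) -> str:
--     repl = {
--         "\\": r"\textbackslash{}",
--         "{": r"\{",
--         "}": r"\}",
--         "#": r"\#",
--         "$": r"\$",
--         "%": r"\%",
--         "&": r"\&",
--         "_": r"\_",
--         "^": r"\^{}",
--         "~": r"\~{}",
--     }
--     return "".join(repl.get(ch, ch) for ch in s)
--
-- def plaintext_to_latex(text: str) -> str:
--     """
--     Regra estável:
--     - linha em branco => novo parágrafo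
--     - quebras de linha dentro do parágrafo viram espaço
--     """
--     text = (text or "").replace("\r\n", "\n").replace("\r", "\n").strip()
--
--     paragraphs = []
--     buf = []
--     for line in text.split("\n"):
--         if line.strip() == "":
--             if buf:
--                 paragraphs.append(" ".join(buf).strip())
--                 buf = []
--         else:
--             buf.append(line.strip())
--     if buf:
--         paragraphs.append(" ".join(buf).strip())
--
--     paragraphs = [escape_latex_text(p) for p in paragraphs]
--     return "\n\n\\par\n\n".join(paragraphs)
-- ===== SOURCE B (Python) =====
-- def escape_latex_text(s: str) -> str:
--     repl = {
--         "\\": r"\textbackslash{}",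
--         "{": r"\{",
--         "}": r"\}",
--         "#": r"\#",
--         "$": r"\$",
--         "%": r"\%",
--         "&": r"\&",
--         "_": r"\_",
--         "^": r"\^{}",
--         "~": r"\~{}",
--     }
--     return "".join(repl.get(ch, ch) for ch in s)
--
-- def plaintext_to_latex(text: str) -> str:
--     # Single pass that emits the output directly: each non-blank line is
--     # escaped on its own and written out, preceded by " " inside a paragraph
--     # or by the paragraph separator at a paragraph boundary.
--     t = (text or "").replace("\r\n", "\n").replace("\r", "\n").strip()
--     out = []
--     in_para = False
--     for ln in t.split("\n"):
--         w = ln.strip()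
--         if w == "":
--             in_para = False
--         else:
--             if out:
--                 out.append(" " if in_para else "\n\n\\par\n\n")
--             out.append(escape_latex_text(w))
--             in_para = True
--     return "".join(out)
-- ===== Notes on version B (the rewrite author's own statement) =====
-- stated objective: alternative
-- what changed: A buffers stripped lines per paragraph, flushes the buffer into a paragraph list on blank lines, then escapes each paragraph and joins with the separator; B is a single emit-as-you-go pass that escapes each non-blank line individually and appends it to the output preceded by a space (inside a paragraph) or the paragraph separator (at a boundary), with no paragraph list or final join.
import Mathlib
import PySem

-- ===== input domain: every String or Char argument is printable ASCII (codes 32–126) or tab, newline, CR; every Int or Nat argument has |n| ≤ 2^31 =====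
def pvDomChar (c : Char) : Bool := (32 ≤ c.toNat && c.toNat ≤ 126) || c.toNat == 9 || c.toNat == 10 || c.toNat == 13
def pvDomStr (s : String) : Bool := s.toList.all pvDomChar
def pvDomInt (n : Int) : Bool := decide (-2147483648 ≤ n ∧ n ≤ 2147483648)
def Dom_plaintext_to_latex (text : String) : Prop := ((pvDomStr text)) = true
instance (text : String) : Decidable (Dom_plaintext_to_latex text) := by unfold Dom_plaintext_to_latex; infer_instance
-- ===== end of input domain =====

-- B rewrites A's flush-a-paragraph-buffer loop as a single pass that escapes each
-- line on its own and emits the output pieces (with " " or the paragraph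
-- separator in front) as it goes; objective: alternative decomposition.

-- ===== PORT A =====
-- the dict literal of escape_latex_text (string keys, as in Python)
def pvRepl : PySem.Dict String String := PySem.Dict.mk [
  ("\\", "\\textbackslash{}"), ("{", "\\{"), ("}", "\\}"), ("#", "\\#"),
  ("$", "\\$"), ("%", "\\%"), ("&", "\\&"), ("_", "\\_"),
  ("^", "\\^{}"), ("~", "\\~{}")]

-- "".join(repl.get(ch, ch) for ch in s)
def escape_latex_text (s : String) : String :=
  PySem.Str.join "" (s.toList.map (fun ch => pvRepl.getD (String.ofList [ch]) (String.ofList [ch])))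

-- A's loop body: a blank line flushes buf into paragraphs, any other line is stripped into buf
def pvStepA (st : List String × List String) (line : String) : List String × List String :=
  if PySem.Str.strip line = "" then
    if st.2 ≠ [] then (st.1 ++ [PySem.Str.strip (PySem.Str.join " " st.2)], []) else st
  else (st.1, st.2 ++ [PySem.Str.strip line])

-- A's trailing "if buf: paragraphs.append(' '.join(buf).strip())"
def pvFlushA (st : List String × List String) : List String :=
  if st.2 ≠ [] then st.1 ++ [PySem.Str.strip (PySem.Str.join " " st.2)] else st.1

def plaintext_to_latex (text : String) : String :=
  -- ('text or ""' is 'text' for every str value; .replace/.strip as in Python)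
  let t := PySem.Str.strip (PySem.Str.replace (PySem.Str.replace text "\r\n" "\n") "\r" "\n")
  -- t.split("\n"): non-empty separator, PySem.Chars.splitOn is the exact form
  let lines := (PySem.Chars.splitOn t.toList ['\n']).map String.ofList
  PySem.Str.join "\n\n\\par\n\n" ((pvFlushA (lines.foldl pvStepA ([], []))).map escape_latex_text)

-- ===== PORT B =====
-- B's loop body: emit each escaped non-blank line, preceded by " " inside a
-- paragraph or by the separator at a paragraph boundary
def pvStepB (st : List String × Bool) (ln : String) : List String × Bool :=
  let w := PySem.Str.strip ln
  if w = "" then (st.1, false)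
  else ((if st.1 ≠ [] then st.1 ++ [if st.2 then " " else "\n\n\\par\n\n"] else st.1)
          ++ [escape_latex_text w], true)

def plaintext_to_latex_alt (text : String) : String :=
  let t := PySem.Str.strip (PySem.Str.replace (PySem.Str.replace text "\r\n" "\n") "\r" "\n")
  PySem.Str.join ""
    (((PySem.Chars.splitOn t.toList ['\n']).map String.ofList).foldl pvStepB ([], false)).1

-- ===== PRECONDITION & SPEC =====
def Spec_plaintext_to_latex (text : String) (out : String) : Prop := out = plaintext_to_latex_alt text
instance (text : String) (out : String) : Decidable (Spec_plaintext_to_latex text out) := by unfold Spec_plaintext_to_latex; infer_instance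

-- ===== CLAIM (what is proved, stated in full; the proofs are below) =====
def Claim_equal_plaintext_to_latex : Prop := ∀ (text : String), Dom_plaintext_to_latex text → Spec_plaintext_to_latex text (plaintext_to_latex text)

-- ===== LEMMAS AND PROOFS =====

-- intercalate bookkeeping
theorem pv_ic_cons (sep x : List Char) (l : List (List Char)) :
    sep.intercalate (x :: l) = x ++ (if l = [] then [] else sep ++ sep.intercalate l) := by
  cases l <;> simp [List.intercalate, List.intersperse]

theorem pv_ic_singleton (sep x : List Char) : sep.intercalate [x] = x := by
  simp [pv_ic_cons]

theorem pv_ic_append_singleton (sep x : List Char) (l : List (List Char)) (h : l ≠ []) :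
    sep.intercalate (l ++ [x]) = sep.intercalate l ++ sep ++ x := by
  induction l with
  | nil => exact absurd rfl h
  | cons a t ih =>
    rcases eq_or_ne t [] with rfl | ht
    · simp [pv_ic_cons]
    · have h1 : (t ++ [x] : List (List Char)) ≠ [] := by simp
      simp only [List.cons_append, pv_ic_cons, if_neg h1, if_neg ht, ih ht]
      simp [List.append_assoc]

theorem pv_ic_nil_flatten (l : List (List Char)) : ([] : List Char).intercalate l = l.flatten := by
  induction l with
  | nil => simp [List.intercalate]
  | cons a t ih =>
    rw [pv_ic_cons]
    rcases eq_or_ne t [] with rfl | ht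
    · simp
    · simp [ih, ht]

theorem pv_ic_concat_last (sep : List Char) (l : List (List Char)) (x y : List Char) :
    sep.intercalate (l ++ [x ++ y]) = sep.intercalate (l ++ [x]) ++ y := by
  rcases eq_or_ne l [] with rfl | hl
  · simp [pv_ic_singleton]
  · rw [pv_ic_append_singleton sep _ l hl, pv_ic_append_singleton sep _ l hl]
    simp [List.append_assoc]

-- dropWhile bookkeeping
theorem pv_dw_head_false {p : Char → Bool} {l : List Char} {c : Char} {t : List Char}
    (hl : l = c :: t) (h : List.dropWhile p l = l) : p c = false := by
  subst hl
  by_cases hc : p c = true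
  · rw [List.dropWhile_cons, if_pos hc] at h
    have hle := List.length_dropWhile_le p t
    rw [h] at hle
    simp at hle
  · simpa using hc

theorem pv_dw_idem (p : Char → Bool) : ∀ l : List Char,
    List.dropWhile p (List.dropWhile p l) = List.dropWhile p l := by
  intro l
  induction l with
  | nil => simp
  | cons a t ih =>
    by_cases h : p a = true <;> simp [h, ih]

theorem pv_dw_prefix_fix {p : Char → Bool} {v u : List Char}
    (hvu : v <+: u) (hu : List.dropWhile p u = u) : List.dropWhile p v = v := by
  cases v with
  | nil => simp
  | cons a t =>
    obtain ⟨r, hr⟩ := hvu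
    subst hr
    have ha : p a = false := pv_dw_head_false (t := t ++ r) rfl hu
    rw [List.dropWhile_cons, if_neg (by simp [ha])]

-- strip bookkeeping (Chars level)
theorem pv_lstrip_append {a : List Char} (b : List Char)
    (ha : PySem.Chars.lstrip a = a) (hne : a ≠ []) :
    PySem.Chars.lstrip (a ++ b) = a ++ b := by
  cases a with
  | nil => exact absurd rfl hne
  | cons c t =>
    have ha' : List.dropWhile PySem.Chars.isspace (c :: t) = c :: t := ha
    have hc : PySem.Chars.isspace c = false := pv_dw_head_false rfl ha'
    show List.dropWhile PySem.Chars.isspace ((c :: t) ++ b) = (c :: t) ++ b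
    rw [List.cons_append, List.dropWhile_cons, if_neg (by simp [hc])]

theorem pv_rstrip_append (a : List Char) {b : List Char}
    (hb : PySem.Chars.rstrip b = b) (hne : b ≠ []) :
    PySem.Chars.rstrip (a ++ b) = a ++ b := by
  have hb' : List.dropWhile PySem.Chars.isspace b.reverse = b.reverse := by
    have := congrArg List.reverse hb
    simpa [PySem.Chars.rstrip] using this
  cases hrb : b.reverse with
  | nil => simp_all
  | cons c t =>
    have hc : PySem.Chars.isspace c = false := pv_dw_head_false hrb hb'
    have hdw : List.dropWhile PySem.Chars.isspace ((a ++ b).reverse) = (a ++ b).reverse := by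
      rw [List.reverse_append, hrb, List.cons_append, List.dropWhile_cons,
        if_neg (by simp [hc]), ← List.cons_append, ← hrb, ← List.reverse_append]
    show (List.dropWhile PySem.Chars.isspace ((a ++ b).reverse)).reverse = a ++ b
    rw [hdw, List.reverse_reverse]

theorem pv_strip_kept (cs : List Char) :
    PySem.Chars.lstrip (PySem.Chars.strip cs) = PySem.Chars.strip cs ∧
    PySem.Chars.rstrip (PySem.Chars.strip cs) = PySem.Chars.strip cs := by
  constructor
  · -- strip cs = rstrip (lstrip cs) is a prefix of lstrip cs, which is dropWhile-fixed
    have hu : List.dropWhile PySem.Chars.isspace (PySem.Chars.lstrip cs) = PySem.Chars.lstrip cs :=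
      pv_dw_idem _ cs
    have hpre : PySem.Chars.strip cs <+: PySem.Chars.lstrip cs := by
      have h1 : List.dropWhile PySem.Chars.isspace (PySem.Chars.lstrip cs).reverse <:+
          (PySem.Chars.lstrip cs).reverse := List.dropWhile_suffix _
      have h2 := List.reverse_prefix.mpr h1
      simpa [PySem.Chars.strip, PySem.Chars.rstrip] using h2
    exact pv_dw_prefix_fix hpre hu
  · -- rstrip is idempotent
    have hrev : (PySem.Chars.rstrip (PySem.Chars.lstrip cs)).reverse =
        List.dropWhile PySem.Chars.isspace (PySem.Chars.lstrip cs).reverse := by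
      simp [PySem.Chars.rstrip]
    show (List.dropWhile PySem.Chars.isspace
        (PySem.Chars.rstrip (PySem.Chars.lstrip cs)).reverse).reverse = PySem.Chars.strip cs
    rw [hrev, pv_dw_idem]
    rfl

theorem pv_strip_fix_of_eq {s : List Char} (h : PySem.Chars.strip s = s) :
    PySem.Chars.lstrip s = s ∧ PySem.Chars.rstrip s = s := by
  have := pv_strip_kept s
  rwa [h] at this

theorem pv_strip_idem (cs : List Char) :
    PySem.Chars.strip (PySem.Chars.strip cs) = PySem.Chars.strip cs := by
  have h := pv_strip_kept cs
  show PySem.Chars.rstrip (PySem.Chars.lstrip _) = _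
  rw [h.1, h.2]

-- a " "-join of stripped non-empty pieces is already stripped
theorem pv_strip_ic_space (bl : List (List Char)) (hne : bl ≠ [])
    (h : ∀ b ∈ bl, PySem.Chars.strip b = b ∧ b ≠ []) :
    PySem.Chars.strip (List.intercalate [' '] bl) = List.intercalate [' '] bl := by
  have hl : PySem.Chars.lstrip (List.intercalate [' '] bl) = List.intercalate [' '] bl := by
    cases bl with
    | nil => exact absurd rfl hne
    | cons b bs =>
      have hb := h b (by simp)
      rw [pv_ic_cons]
      exact pv_lstrip_append _ (pv_strip_fix_of_eq hb.1).1 hb.2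
  have hr : PySem.Chars.rstrip (List.intercalate [' '] bl) = List.intercalate [' '] bl := by
    rcases List.eq_nil_or_concat bl with rfl | ⟨L, b, rfl⟩
    · exact absurd rfl hne
    · have hb := h b (by simp)
      rcases eq_or_ne L [] with rfl | hL
      · simpa [pv_ic_singleton] using (pv_strip_fix_of_eq hb.1).2
      · rw [List.concat_eq_append, pv_ic_append_singleton _ _ _ hL]
        exact pv_rstrip_append _ (pv_strip_fix_of_eq hb.1).2 hb.2
  show PySem.Chars.rstrip (PySem.Chars.lstrip _) = _
  rw [hl, hr]

-- escaping, character by character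
def pvF (c : Char) : List Char := (pvRepl.getD (String.ofList [c]) (String.ofList [c])).toList

theorem pv_esc_toList (s : String) :
    (escape_latex_text s).toList = (s.toList.map pvF).flatten := by
  rw [escape_latex_text, PySem.Str.toList_join]
  show PySem.Chars.join [] _ = _
  rw [PySem.Chars.join, pv_ic_nil_flatten, List.map_map]
  rfl

theorem pv_F_space : pvF ' ' = [' '] := by decide

-- abbreviation for proofs: the char list of an escaped string
def pvEscT (p : String) : List Char := (escape_latex_text p).toList

-- the loop invariant tying A's state (paragraphs, buf) to B's state (out, in_para)
def pvInv (a : List String × List String) (b : List String × Bool) : Prop :=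
  b.2 = decide (a.2 ≠ []) ∧
  (b.1 = [] ↔ (a.1 = [] ∧ a.2 = [])) ∧
  (b.1.map String.toList).flatten =
    List.intercalate "\n\n\\par\n\n".toList ((pvFlushA a).map pvEscT) ∧
  ∀ s ∈ a.2, PySem.Str.strip s = s ∧ s ≠ ""

theorem pv_str_strip_idem (s : String) :
    PySem.Str.strip (PySem.Str.strip s) = PySem.Str.strip s := by
  apply String.toList_inj.mp
  simp [PySem.Str.toList_strip, pv_strip_idem]

-- strip is the identity on a " "-join of stripped non-empty strings
theorem pv_str_join_stripped (l : List String) (hl : l ≠ [])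
    (hall : ∀ s ∈ l, PySem.Str.strip s = s ∧ s ≠ "") :
    (PySem.Str.strip (PySem.Str.join " " l)).toList =
      List.intercalate [' '] (l.map String.toList) := by
  rw [PySem.Str.toList_strip, PySem.Str.toList_join]
  show PySem.Chars.strip (List.intercalate [' '] _) = _
  apply pv_strip_ic_space
  · simp [hl]
  · intro bb hbb
    simp only [List.mem_map] at hbb
    obtain ⟨s, hs, rfl⟩ := hbb
    obtain ⟨hs1, hs2⟩ := hall s hs
    constructor
    · rw [← PySem.Str.toList_strip, hs1]
    · intro hc
      exact hs2 (String.toList_inj.mp (by simpa using hc))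

theorem pv_inv_step (a : List String × List String) (b : List String × Bool)
    (h : pvInv a b) (line : String) : pvInv (pvStepA a line) (pvStepB b line) := by
  obtain ⟨h1, h2, h3, h4⟩ := h
  by_cases hw : PySem.Str.strip line = ""
  · -- blank line
    have hBs : pvStepB b line = (b.1, false) := by simp [pvStepB, hw]
    rcases eq_or_ne a.2 [] with hbuf | hbuf
    · -- nothing buffered: A's state is unchanged
      have hA : pvStepA a line = a := by simp [pvStepA, hw, hbuf]
      rw [hA, hBs]
      exact ⟨by simp [hbuf], h2, h3, h4⟩
    · -- flush
      have hA : pvStepA a line = (a.1 ++ [PySem.Str.strip (PySem.Str.join " " a.2)], []) := by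
        simp [pvStepA, hw, hbuf]
      rw [hA, hBs]
      refine ⟨by simp, ?_, ?_, by simp⟩
      · constructor
        · intro hB0
          exact absurd (h2.mp hB0).2 hbuf
        · rintro ⟨hx, -⟩
          exact absurd hx (by simp)
      · rw [h3]
        simp [pvFlushA, hbuf]
  · -- non-blank line, w := strip line
    have hwne : PySem.Str.strip line ≠ "" := hw
    have hwkept : PySem.Str.strip (PySem.Str.strip line) = PySem.Str.strip line :=
      pv_str_strip_idem line
    have hA : pvStepA a line = (a.1, a.2 ++ [PySem.Str.strip line]) := by
      simp [pvStepA, hw]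
    have hBs : pvStepB b line =
        ((if b.1 ≠ [] then b.1 ++ [if b.2 then " " else "\n\n\\par\n\n"] else b.1)
          ++ [escape_latex_text (PySem.Str.strip line)], true) := by
      simp [pvStepB, hw]
    have hmem : ∀ s ∈ a.2 ++ [PySem.Str.strip line], PySem.Str.strip s = s ∧ s ≠ "" := by
      intro s hs
      rcases List.mem_append.mp hs with hh | hh
      · exact h4 s hh
      · simp only [List.mem_singleton] at hh
        subst hh
        exact ⟨hwkept, hwne⟩
    rcases eq_or_ne a.2 [] with hbuf | hbuf
    · -- start of a new paragraph
      have hb2 : b.2 = false := by simp [h1, hbuf]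
      have hjw : PySem.Str.strip (PySem.Str.join " " [PySem.Str.strip line]) = PySem.Str.strip line := by
        have hj : PySem.Str.join " " [PySem.Str.strip line] = PySem.Str.strip line := by
          apply String.toList_inj.mp
          rw [PySem.Str.toList_join]
          show PySem.Chars.join [' '] _ = _
          rw [PySem.Chars.join]
          simp [pv_ic_singleton]
        rw [hj, hwkept]
      have hfl' : pvFlushA (a.1, a.2 ++ [PySem.Str.strip line]) = a.1 ++ [PySem.Str.strip line] := by
        simp [pvFlushA, hbuf, hjw]
      rcases eq_or_ne a.1 [] with hps | hps
      · -- very first piece of output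
        have hB0 : b.1 = [] := h2.mpr ⟨hps, hbuf⟩
        rw [hA, hBs]
        refine ⟨by simp, by simp, ?_, hmem⟩
        · rw [hB0, hfl', hps]
          simp [pv_ic_singleton, pvEscT]
      · -- previous paragraphs exist: B prepends the separator
        have hB0 : b.1 ≠ [] := fun hc => hps (h2.mp hc).1
        have hfl : pvFlushA a = a.1 := by simp [pvFlushA, hbuf]
        rw [hA, hBs]
        refine ⟨by simp, by simp, ?_, hmem⟩
        · rw [if_pos hB0, hb2]
          rw [List.append_assoc]
          simp only [List.map_append, List.flatten_append]
          rw [h3, hfl, hfl']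
          simp only [List.map_append, List.map_cons, List.map_nil]
          rw [pv_ic_append_singleton "\n\n\\par\n\n".toList
            (pvEscT (PySem.Str.strip line)) (List.map pvEscT a.1) (by simp [hps])]
          simp [pvEscT]
    · -- inside a paragraph: B appends " " and the escaped line
      have hb2 : b.2 = true := by simp [h1, hbuf]
      have hB0 : b.1 ≠ [] := fun hc => hbuf (h2.mp hc).2
      have hfl : pvFlushA a = a.1 ++ [PySem.Str.strip (PySem.Str.join " " a.2)] := by
        simp [pvFlushA, hbuf]
      have hfl' : pvFlushA (a.1, a.2 ++ [PySem.Str.strip line]) =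
          a.1 ++ [PySem.Str.strip (PySem.Str.join " " (a.2 ++ [PySem.Str.strip line]))] := by
        simp [pvFlushA]
      have e1 := pv_str_join_stripped a.2 hbuf h4
      have e2 := pv_str_join_stripped (a.2 ++ [PySem.Str.strip line])
        (show (a.2 ++ [PySem.Str.strip line]) ≠ [] by simp) hmem
      -- the escaped new paragraph is the escaped old one ++ ' ' ++ the escaped line
      have hnew : pvEscT (PySem.Str.strip (PySem.Str.join " " (a.2 ++ [PySem.Str.strip line]))) =
          pvEscT (PySem.Str.strip (PySem.Str.join " " a.2)) ++
            ([' '] ++ pvEscT (PySem.Str.strip line)) := by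
        simp only [pvEscT, pv_esc_toList]
        rw [e1, e2]
        simp only [List.map_append, List.map_cons, List.map_nil]
        rw [pv_ic_append_singleton [' '] (PySem.Str.strip line).toList
          (List.map String.toList a.2) (by simp [hbuf])]
        simp [pv_F_space, List.append_assoc]
      rw [hA, hBs]
      refine ⟨by simp, by simp, ?_, hmem⟩
      · rw [if_pos hB0, hb2]
        rw [List.append_assoc]
        simp only [List.map_append, List.flatten_append]
        rw [h3, hfl, hfl']
        simp only [List.map_append, List.map_cons, List.map_nil]
        rw [hnew, pv_ic_concat_last]
        simp [pvEscT]

theorem pv_inv_fold (lines : List String) :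
    ∀ (a : List String × List String) (b : List String × Bool), pvInv a b →
      pvInv (lines.foldl pvStepA a) (lines.foldl pvStepB b) := by
  induction lines with
  | nil => intro a b h; exact h
  | cons l t ih =>
    intro a b h
    exact ih _ _ (pv_inv_step a b h l)

theorem pv_main (lines : List String) :
    PySem.Str.join "" (lines.foldl pvStepB ([], false)).1 =
      PySem.Str.join "\n\n\\par\n\n" ((pvFlushA (lines.foldl pvStepA ([], []))).map escape_latex_text) := by
  have h0 : pvInv ([], []) ([], false) := by
    refine ⟨by simp, by simp, by simp [pvFlushA, List.intercalate], by simp⟩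
  obtain ⟨-, -, h3, -⟩ := pv_inv_fold lines ([], []) ([], false) h0
  apply String.toList_inj.mp
  rw [PySem.Str.toList_join, PySem.Str.toList_join]
  show PySem.Chars.join [] _ = PySem.Chars.join _ _
  simp only [PySem.Chars.join, pv_ic_nil_flatten]
  rw [h3]
  simp only [List.map_map]
  rfl

-- ===== VERDICT (by name: the statement is the Claim_ definition above) =====
theorem plaintext_to_latex_spec : Claim_equal_plaintext_to_latex := by
  intro text _
  show plaintext_to_latex _ = plaintext_to_latex_alt _
  simp only [plaintext_to_latex, plaintext_to_latex_alt]
  exact (pv_main _).symm
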